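-- pv_equiv track=rewrite | github.com/mzheng27/Texts_Similarity | Compare texts.py | sentence_lengths_help
-- ===== SOURCE A (Python) =====
-- def sentence_lengths_help(s):
--     """helper function to define the length of the sentence
--         input: s is a string
--     """
--     string = s.split()
--     a = 0
--     b = []
--     for x in string:
--         if x[-1] not in '.!?':
--             a += 1
--         else:
--             b += [a+1]
--             a = 0
--     return b
-- ===== SOURCE B (Python) =====
-- def sentence_lengths_help(s):
--     def go(words, k):
--         if not words:
--             return []
--         if words[0][-1] in '.!?':
--             return [k + 1] + go(words[1:], 0)
--         return go(words[1:], k + 1)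
--     return go(s.split(), 0)
-- ===== Notes on version B (the rewrite author's own statement) =====
-- stated objective: alternative
-- what changed: B replaces A's iterative loop that appends each finished count to an accumulator list with a recursive decomposition over the word list that builds the result front-to-back by consing, carrying only the pending word count.
import Mathlib
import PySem

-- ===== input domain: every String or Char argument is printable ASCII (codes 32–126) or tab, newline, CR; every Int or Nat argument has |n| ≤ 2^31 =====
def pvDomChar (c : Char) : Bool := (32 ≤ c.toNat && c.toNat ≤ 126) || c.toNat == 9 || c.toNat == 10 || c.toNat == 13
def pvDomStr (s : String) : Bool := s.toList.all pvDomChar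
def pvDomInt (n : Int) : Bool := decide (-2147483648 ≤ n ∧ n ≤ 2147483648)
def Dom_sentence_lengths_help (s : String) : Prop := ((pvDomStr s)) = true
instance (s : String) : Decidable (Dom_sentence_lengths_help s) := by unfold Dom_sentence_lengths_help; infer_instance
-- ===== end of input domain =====

-- B replaces A's append-to-accumulator loop by a recursion that conses the result front-to-back (objective: alternative decomposition).

-- ===== PORT A =====
-- x[-1] in '.!?' ; the `none` case of pyGet? (empty word) is unreachable: s.split() yields nonempty words
def pvATerm (x : String) : Bool :=
  match PySem.Str.pyGet? x (-1) with
  | some c => (".!?".toList).contains c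
  | none => false

def sentence_lengths_help (s : String) : List Int :=
  (((PySem.Str.split₀ s).foldl
      (fun (st : Int × List Int) x =>
        if !(pvATerm x) then (st.1 + 1, st.2) else (0, st.2 ++ [st.1 + 1]))
      (0, []))).2

-- ===== PORT B =====
-- words[0][-1] in '.!?' ; `none` (empty word) unreachable for the same reason
def pvBTerm (x : String) : Bool :=
  match PySem.Str.pyGet? x (-1) with
  | some c => (".!?".toList).contains c
  | none => false

def pvBGo : List String → Int → List Int
  | [], _ => []
  | x :: rest, k => if pvBTerm x then (k + 1) :: pvBGo rest 0 else pvBGo rest (k + 1)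

def sentence_lengths_help_alt (s : String) : List Int :=
  pvBGo (PySem.Str.split₀ s) 0

-- ===== PRECONDITION & SPEC =====
def Spec_sentence_lengths_help (s : String) (out : List Int) : Prop := out = sentence_lengths_help_alt s
instance (s : String) (out : List Int) : Decidable (Spec_sentence_lengths_help s out) := by unfold Spec_sentence_lengths_help; infer_instance

-- ===== CLAIM (what is proved, stated in full; the proofs are below) =====
def Claim_equal_sentence_lengths_help : Prop := ∀ (s : String), Dom_sentence_lengths_help s → Spec_sentence_lengths_help s (sentence_lengths_help s)

-- ===== LEMMAS AND PROOFS =====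

-- loop invariant: A's fold with pending count a and accumulator acc yields acc ++ pvBGo ws a
theorem pv_inv (ws : List String) :
    ∀ (a : Int) (acc : List Int),
    (ws.foldl
        (fun (st : Int × List Int) x =>
          if !(pvATerm x) then (st.1 + 1, st.2) else (0, st.2 ++ [st.1 + 1]))
        (a, acc)).2
    = acc ++ pvBGo ws a := by
  induction ws with
  | nil => intro a acc; simp [pvBGo]
  | cons x xs ih =>
    intro a acc
    by_cases hx : pvATerm x
    · have hb : pvBTerm x = true := hx
      simp only [List.foldl, hx, Bool.not_true, Bool.false_eq_true, if_false, pvBGo, hb, if_true]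
      rw [ih 0 (acc ++ [a + 1])]
      simp
    · have hb : pvBTerm x = false := by rwa [Bool.not_eq_true] at hx
      rw [Bool.not_eq_true] at hx
      simp only [List.foldl, hx, Bool.not_false, if_true, pvBGo, hb, Bool.false_eq_true, if_false]
      exact ih (a + 1) acc

-- ===== VERDICT (by name: the statement is the Claim_ definition above) =====
theorem sentence_lengths_help_spec : Claim_equal_sentence_lengths_help := by
  intro s _
  unfold Spec_sentence_lengths_help sentence_lengths_help sentence_lengths_help_alt
  exact pv_inv (PySem.Str.split₀ s) 0 []
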